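-- pv_equiv track=rewrite | github.com/CryptoSignal/Crypto-Signal | app/behaviour.py | detectFirstMacdPositiveSlotPosition
-- ===== SOURCE A (Python) =====
-- def detectFirstMacdPositiveSlotPosition(macd):
--     flag = False;
--     for i in range(len(macd)-1, -1, -1):
--         if (macd[i] > 0):
--             if (flag == True):
--                 return i + 1;
--             else:
--                 flag = True;
--
--             if(i == 0):
--                 return 0;
--         elif (flag == True) :
--             return i;
-- ===== SOURCE B (Python) =====
-- def detectFirstMacdPositiveSlotPosition(macd):
--     p = None
--     for i, v in enumerate(macd):
--         if v > 0:
--             p = i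
--     if p is None:
--         return None
--     if p == 0:
--         return 0
--     if macd[p - 1] > 0:
--         return p
--     return p - 1
-- ===== Notes on version B (the rewrite author's own statement) =====
-- stated objective: simpler
-- what changed: Replaces the backward scan with a flag state machine and three interleaved early returns by a locate-then-classify decomposition: a forward pass records the last positive index, then one flat branch chain classifies it.
import Mathlib
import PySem

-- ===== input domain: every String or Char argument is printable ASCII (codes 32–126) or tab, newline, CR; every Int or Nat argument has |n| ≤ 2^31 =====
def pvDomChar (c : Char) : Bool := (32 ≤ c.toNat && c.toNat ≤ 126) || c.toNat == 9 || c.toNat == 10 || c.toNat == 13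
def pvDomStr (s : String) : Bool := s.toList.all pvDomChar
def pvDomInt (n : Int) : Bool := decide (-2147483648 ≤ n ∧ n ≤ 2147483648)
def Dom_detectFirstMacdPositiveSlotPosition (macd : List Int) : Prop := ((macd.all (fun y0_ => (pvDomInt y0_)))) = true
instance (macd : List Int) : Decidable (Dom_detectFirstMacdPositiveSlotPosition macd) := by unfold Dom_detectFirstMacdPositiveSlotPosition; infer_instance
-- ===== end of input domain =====

-- B replaces A's backward flag state machine by a forward last-positive-index pass plus a flat classification; equal results, same O(n) cost.


-- ===== PORT A =====
-- the 'for i in range(len(macd)-1, -1, -1)' loop as a countdown recursion; fuel = i+1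
def aLoop (macd : List Int) (flag : Bool) : Nat → Option Int
  | 0 => none
  | k+1 =>
    match PySem.List.pyGet? macd (k : Int) with
    | none => none   -- unreachable: k < len macd
    | some v =>
      if v > 0 then
        if flag then some ((k : Int) + 1)
        else if k = 0 then some 0
        else aLoop macd true k
      else if flag then some (k : Int)
      else aLoop macd flag k

def detectFirstMacdPositiveSlotPosition (macd : List Int) : Option Int :=
  aLoop macd false macd.length

-- ===== PORT B =====
-- forward pass: p = index of the last positive entry (None if none)
def lastPosIdx (macd : List Int) : Option Int :=
  (PySem.List.enumerate macd 0).foldl (fun acc x => if x.2 > 0 then some x.1 else acc) none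

def detectFirstMacdPositiveSlotPosition_alt (macd : List Int) : Option Int :=
  match lastPosIdx macd with
  | none => none
  | some p =>
    if p = 0 then some 0
    else
      match PySem.List.pyGet? macd (p - 1) with
      | none => none   -- unreachable: 1 ≤ p < len macd
      | some v => if v > 0 then some p else some (p - 1)

-- ===== PRECONDITION & SPEC =====
def Spec_detectFirstMacdPositiveSlotPosition (macd : List Int) (out : Option Int) : Prop := out = detectFirstMacdPositiveSlotPosition_alt macd
instance (macd : List Int) (out : Option Int) : Decidable (Spec_detectFirstMacdPositiveSlotPosition macd out) := by unfold Spec_detectFirstMacdPositiveSlotPosition; infer_instance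

-- ===== CLAIM (what is proved, stated in full; the proofs are below) =====
def Claim_equal_detectFirstMacdPositiveSlotPosition : Prop := ∀ (macd : List Int), Dom_detectFirstMacdPositiveSlotPosition macd → Spec_detectFirstMacdPositiveSlotPosition macd (detectFirstMacdPositiveSlotPosition macd)

-- ===== LEMMAS AND PROOFS =====

-- appending one element does not change the loop on fuel ≤ length
lemma aLoop_append (ys : List Int) (v : Int) :
    ∀ (k : Nat) (flag : Bool), k ≤ ys.length → aLoop (ys ++ [v]) flag k = aLoop ys flag k := by
  intro k
  induction k with
  | zero => intro flag _; rfl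
  | succ k ih =>
    intro flag hk
    have hlt : k < ys.length := hk
    have hget : (ys ++ [v])[k]? = ys[k]? := List.getElem?_append_left hlt
    simp only [aLoop, PySem.List.pyGet?_natCast, hget]
    rw [List.getElem?_eq_getElem hlt]
    by_cases hv : ys[k] > 0 <;> by_cases hf : flag <;>
      simp [hv, hf, ih _ (Nat.le_of_succ_le hk)]

-- once the flag is set the loop returns on the next step
lemma aLoop_true (ys : List Int) (k : Nat) (h : k < ys.length) :
    aLoop ys true (k + 1) = some (if ys[k] > 0 then (k : Int) + 1 else (k : Int)) := by
  simp only [aLoop, PySem.List.pyGet?_natCast, List.getElem?_eq_getElem h]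
  by_cases hv : ys[k] > 0 <;> simp [hv]

-- the last-positive fold either keeps the accumulator or returns a valid index offset by the start
lemma lastPos_fold_cases (ys : List Int) :
    ∀ (s : Int) (acc : Option Int),
      (PySem.List.enumerate ys s).foldl (fun acc x => if x.2 > 0 then some x.1 else acc) acc = acc ∨
      ∃ q : Nat, q < ys.length ∧
        (PySem.List.enumerate ys s).foldl (fun acc x => if x.2 > 0 then some x.1 else acc) acc = some (s + q) := by
  induction ys with
  | nil => intro s acc; left; simp [PySem.List.enumerate_nil]
  | cons y ys ih =>
    intro s acc
    rw [PySem.List.enumerate_cons]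
    simp only [List.foldl_cons]
    rcases ih (s + 1) (if y > 0 then some s else acc) with h | ⟨q, hq, h⟩
    · rw [h]
      by_cases hy : y > 0
      · right; exact ⟨0, by simp, by simp [hy]⟩
      · left; simp [hy]
    · right
      exact ⟨q + 1, by simpa using Nat.succ_lt_succ hq, by rw [h]; congr 1; push_cast; ring⟩

lemma lastPosIdx_bound (ys : List Int) (p : Int) (h : lastPosIdx ys = some p) :
    ∃ q : Nat, q < ys.length ∧ p = (q : Int) := by
  unfold lastPosIdx at h
  rcases lastPos_fold_cases ys 0 none with h' | ⟨q, hq, h'⟩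
  · rw [h'] at h; exact absurd h (by simp)
  · rw [h'] at h
    exact ⟨q, hq, by simpa using h.symm⟩

lemma lastPosIdx_append (ys : List Int) (v : Int) :
    lastPosIdx (ys ++ [v]) = if v > 0 then some (ys.length : Int) else lastPosIdx ys := by
  unfold lastPosIdx
  rw [PySem.List.enumerate_append]
  simp only [List.foldl_append, PySem.List.enumerate_cons, PySem.List.enumerate_nil,
    List.foldl_cons, List.foldl_nil]
  by_cases hv : v > 0 <;> simp [hv]

lemma main_eq (macd : List Int) :
    detectFirstMacdPositiveSlotPosition macd = detectFirstMacdPositiveSlotPosition_alt macd := by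
  induction macd using List.reverseRecOn with
  | nil => rfl
  | append_singleton ys v ih =>
    have hlen : (ys ++ [v]).length = ys.length + 1 := by simp
    have hgetv : (ys ++ [v])[ys.length]? = some v := by
      simp
    unfold detectFirstMacdPositiveSlotPosition
    rw [hlen]
    simp only [aLoop, PySem.List.pyGet?_natCast, hgetv]
    unfold detectFirstMacdPositiveSlotPosition_alt
    rw [lastPosIdx_append]
    by_cases hv : v > 0
    · simp only [hv, if_pos]
      cases hys : ys.length with
      | zero => simp
      | succ k =>
        have hk : k < ys.length := by omega
        rw [if_neg (by simp : ¬ (false = true)), if_neg (Nat.succ_ne_zero k)]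
        rw [aLoop_append ys v (k+1) true (by omega), aLoop_true ys k hk]
        have h1 : (((k+1 : Nat) : Int)) = (k : Int) + 1 := by push_cast; ring
        rw [h1, if_neg (by omega : ¬ ((k : Int) + 1 = 0))]
        have h2 : ((k : Int) + 1 - 1) = ((k : Nat) : Int) := by ring
        rw [h2]
        have hget2 : (ys ++ [v])[k]? = ys[k]? := List.getElem?_append_left hk
        simp only [PySem.List.pyGet?_natCast, hget2, List.getElem?_eq_getElem hk]
        by_cases hyk : ys[k] > 0 <;> simp [hyk]
    · simp only [hv, if_false]
      rw [aLoop_append ys v ys.length false (le_refl _)]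
      rw [show aLoop ys false ys.length = detectFirstMacdPositiveSlotPosition ys from rfl, ih]
      unfold detectFirstMacdPositiveSlotPosition_alt
      cases hlp : lastPosIdx ys with
      | none => rfl
      | some p =>
        obtain ⟨q, hq, rfl⟩ := lastPosIdx_bound ys p hlp
        by_cases hq0 : (q : Int) = 0
        · simp [hq0]
        · have hq1 : 1 ≤ q := by omega
          have hsub : ((q : Int) - 1) = ((q - 1 : Nat) : Int) := by omega
          have hlt : q - 1 < ys.length := by omega
          have hget3 : (ys ++ [v])[q-1]? = ys[q-1]? := List.getElem?_append_left hlt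
          simp only [if_neg hq0, hsub, PySem.List.pyGet?_natCast, hget3]
          rfl

-- ===== VERDICT (by name: the statement is the Claim_ definition above) =====
theorem detectFirstMacdPositiveSlotPosition_spec : Claim_equal_detectFirstMacdPositiveSlotPosition := by
  intro macd _
  unfold Spec_detectFirstMacdPositiveSlotPosition
  exact main_eq macd
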